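-- pv_equiv track=rewrite | github.com/highwayns/vibesdk | docs/md_prettify.py | count_unescaped_pipes
-- ===== SOURCE A (Python) =====
-- def count_unescaped_pipes(line: str) -> int:
--     # count pipes not escaped and not inside inline code (`...`)
--     in_code = False
--     esc = False
--     cnt = 0
--     for ch in line:
--         if esc:
--             esc = False
--             continue
--         if ch == "\\":
--             esc = True
--             continue
--         if ch == "`":
--             in_code = not in_code
--             continue
--         if ch == "|" and not in_code:
--             cnt += 1
--     return cnt
-- ===== SOURCE B (Python) =====
-- def _strip_escapes(line):
--     # pass 1: delete every backslash together with the character it escapes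
--     out = []
--     it = iter(line)
--     for ch in it:
--         if ch == "\\":
--             next(it, None)
--         else:
--             out.append(ch)
--     return "".join(out)
--
--
-- def count_unescaped_pipes(line: str) -> int:
--     # staged passes: strip escape pairs, split on backticks, count pipes in the
--     # even-indexed segments (those are outside inline code)
--     parts = _strip_escapes(line).split("`")
--     return sum(part.count("|") for part in parts[::2])
-- ===== Notes on version B (the rewrite author's own statement) =====
-- stated objective: alternative
-- what changed: Replaces A's single-pass three-state scan with staged passes: first delete each backslash-escape pair, then split the remainder on backticks and sum the pipe counts of the even-indexed segments.
import Mathlib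
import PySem

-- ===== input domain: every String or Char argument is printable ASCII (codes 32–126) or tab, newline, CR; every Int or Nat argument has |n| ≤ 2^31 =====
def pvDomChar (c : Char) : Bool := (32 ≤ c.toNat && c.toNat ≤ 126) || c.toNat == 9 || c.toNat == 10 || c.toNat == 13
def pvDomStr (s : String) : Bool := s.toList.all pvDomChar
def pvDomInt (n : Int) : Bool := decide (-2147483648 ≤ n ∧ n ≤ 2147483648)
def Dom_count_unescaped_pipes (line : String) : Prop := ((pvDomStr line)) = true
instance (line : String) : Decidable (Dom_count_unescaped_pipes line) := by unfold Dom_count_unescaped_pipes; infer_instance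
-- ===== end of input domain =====

-- B computes the same count by staged passes (strip escape pairs, split on backticks,
-- count pipes in even segments) instead of A's single three-state scan.

-- ===== PORT A =====
-- literal port of A: fold over the characters with state (in_code, esc, cnt)
def pvLoopA : List Char → Bool → Bool → Int → Int
  | [], _, _, cnt => cnt
  | ch :: rest, in_code, esc, cnt =>
    if esc then pvLoopA rest in_code false cnt
    else if ch = '\\' then pvLoopA rest in_code true cnt
    else if ch = '`' then pvLoopA rest (!in_code) esc cnt
    else if ch = '|' && !in_code then pvLoopA rest in_code esc (cnt + 1)
    else pvLoopA rest in_code esc cnt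

def count_unescaped_pipes (line : String) : Int :=
  pvLoopA line.toList false false 0

-- ===== PORT B =====
-- pass 1 of Source B: delete each backslash together with the character it escapes
def pvStripEsc : List Char → List Char
  | [] => []
  | c :: rest =>
    if c = '\\' then pvStripEsc rest.tail else c :: pvStripEsc rest
termination_by l => l.length
decreasing_by all_goals simp [List.length_tail]

-- hand port of str.split("`") over List Char (exact: '`' is a single separator char)
def pvSplitTicks : List Char → List (List Char)
  | [] => [[]]
  | c :: rest =>
    if c = '`' then [] :: pvSplitTicks rest
    else
      match pvSplitTicks rest with
      | [] => [[c]]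
      | s :: ss => (c :: s) :: ss

-- parts[::2]
def pvEveryOther : List (List Char) → List (List Char)
  | [] => []
  | x :: rest => x :: pvEveryOther rest.tail
termination_by l => l.length
decreasing_by all_goals simp [List.length_tail]

def count_unescaped_pipes_alt (line : String) : Int :=
  ((pvEveryOther (pvSplitTicks (pvStripEsc line.toList))).map
    (fun part => (part.count '|' : Int))).sum

-- ===== PRECONDITION & SPEC =====
def Spec_count_unescaped_pipes (line : String) (out : Int) : Prop := out = count_unescaped_pipes_alt line
instance (line : String) (out : Int) : Decidable (Spec_count_unescaped_pipes line out) := by unfold Spec_count_unescaped_pipes; infer_instance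

-- ===== CLAIM =====
def Claim_equal_count_unescaped_pipes : Prop := ∀ (line : String), Dom_count_unescaped_pipes line → Spec_count_unescaped_pipes line (count_unescaped_pipes line)

-- ===== LEMMAS AND PROOFS =====

-- escape-free state machine (A's loop once escapes are gone)
def pvM : List Char → Bool → Int → Int
  | [], _, cnt => cnt
  | c :: rest, ic, cnt =>
    if c = '`' then pvM rest (!ic) cnt
    else if c = '|' && !ic then pvM rest ic (cnt + 1)
    else pvM rest ic cnt

theorem pvLoopA_stripEsc : ∀ (n : Nat) (l : List Char), l.length ≤ n →
    ∀ (ic : Bool) (cnt : Int), pvLoopA l ic false cnt = pvM (pvStripEsc l) ic cnt := by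
  intro n
  induction n with
  | zero =>
    intro l hl ic cnt
    have : l = [] := List.length_eq_zero_iff.mp (Nat.le_zero.mp hl)
    simp [this, pvLoopA, pvStripEsc, pvM]
  | succ n ih =>
    intro l hl ic cnt
    match l with
    | [] => simp [pvLoopA, pvStripEsc, pvM]
    | ch :: rest =>
      simp only [pvLoopA, pvStripEsc]
      by_cases hb : ch = '\\'
      · simp only [hb]
        match rest with
        | [] => simp [pvLoopA, pvStripEsc, pvM]
        | ch2 :: rest2 =>
          simp only [pvLoopA, List.tail]
          exact ih rest2 (by simp at hl ⊢; omega) ic cnt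
      · simp only [if_neg hb]
        by_cases hg : ch = '`'
        · simp [hg, pvM, ih rest (by simp at hl ⊢; omega)]
        · by_cases hp : (ch = '|' && !ic) = true
          · simp [hg, pvM, hp, ih rest (by simp at hl ⊢; omega)]
          · simp [hg, pvM, hp, ih rest (by simp at hl ⊢; omega)]

def pvSum (ls : List (List Char)) : Int :=
  (ls.map (fun part => (part.count '|' : Int))).sum

theorem pvSplitTicks_ne_nil : ∀ (l : List Char), pvSplitTicks l ≠ [] := by
  intro l
  match l with
  | [] => simp [pvSplitTicks]
  | c :: rest =>
    simp only [pvSplitTicks]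
    split
    · simp
    · match h : pvSplitTicks rest with
      | [] => simp
      | s :: ss => simp

theorem pvM_split : ∀ (l : List Char) (ic : Bool) (cnt : Int),
    pvM l ic cnt = cnt + pvSum (pvEveryOther
      (if ic then (pvSplitTicks l).tail else pvSplitTicks l)) := by
  intro l
  induction l with
  | nil =>
    intro ic cnt
    cases ic <;> simp [pvM, pvSplitTicks, pvEveryOther, pvSum]
  | cons c rest ih =>
    intro ic cnt
    by_cases hg : c = '`'
    · subst hg
      cases ic <;> simp [pvM, pvSplitTicks, pvEveryOther, pvSum, ih]
    · obtain ⟨s, ss, hss⟩ : ∃ s ss, pvSplitTicks rest = s :: ss := by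
        match h : pvSplitTicks rest with
        | [] => exact absurd h (pvSplitTicks_ne_nil rest)
        | s :: ss => exact ⟨s, ss, rfl⟩
      by_cases hp : (c = '|' && !ic) = true
      · have hc : c = '|' := by simp at hp; exact hp.1
        have hic : ic = false := by simp at hp; simpa using hp.2
        subst hc; subst hic
        simp [pvM, pvSplitTicks, hss, pvEveryOther, pvSum, ih, List.count_cons]
        ring
      · cases ic
        · have hc : c ≠ '|' := by simp at hp; simpa using hp
          simp [pvM, pvSplitTicks, hg, hc, hss, pvEveryOther, pvSum, ih, List.count_cons]
        · simp [pvM, pvSplitTicks, hg, hss, pvEveryOther, pvSum, ih]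

-- ===== VERDICT =====
theorem count_unescaped_pipes_spec : Claim_equal_count_unescaped_pipes := by
  intro line _
  unfold Spec_count_unescaped_pipes count_unescaped_pipes count_unescaped_pipes_alt
  rw [pvLoopA_stripEsc line.toList.length line.toList (le_refl _) false 0,
      pvM_split (pvStripEsc line.toList) false 0]
  simp [pvSum]
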